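-- pv_equiv track=rewrite | github.com/hector-cao/virt-hwe | hwe-gencontrol.py | parse_control_paragraph
-- ===== SOURCE A (Python) =====
-- def parse_control_paragraph(text: str):
--     fields = []
--     current_name = None
--     current_value_lines = []
--
--     for raw_line in text.splitlines():
--         if not raw_line.strip():
--             continue
--
--         if raw_line[0].isspace():
--             if current_name is None:
--                 raise ValueError("Unexpected continuation line in control file")
--             current_value_lines.append(raw_line)
--             continue
--
--         if current_name is not None:
--             fields.append((current_name, "\n".join(current_value_lines)))
--
--         if ":" not in raw_line:
--             raise ValueError(f"Invalid control line: {raw_line}")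
--
--         current_name, value = raw_line.split(":", 1)
--         current_name = current_name.strip()
--         current_value_lines = [value.lstrip()]
--
--     if current_name is not None:
--         fields.append((current_name, "\n".join(current_value_lines)))
--
--     return fields
-- ===== SOURCE B (Python) =====
-- def parse_control_paragraph(text: str):
--     # Pass 1: group the non-blank lines into paragraphs' line-groups.
--     groups = []
--     for line in text.splitlines():
--         if not line.strip():
--             continue
--         if line[0].isspace():
--             if not groups:
--                 raise ValueError("Unexpected continuation line in control file")
--             groups[-1].append(line)
--         else:
--             groups.append([line])
--     # Pass 2: turn each group into one (name, value) field.
--     fields = []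
--     for head, *conts in groups:
--         if ":" not in head:
--             raise ValueError(f"Invalid control line: {head}")
--         name, value = head.split(":", 1)
--         fields.append((name.strip(), "\n".join([value.lstrip()] + conts)))
--     return fields
-- ===== Notes on version B (the rewrite author's own statement) =====
-- stated objective: alternative
-- what changed: Replaces A's single stateful loop (current_name/current_value_lines threaded through one pass) with a two-pass decomposition: first group non-blank lines into per-field line groups, then map each group to a (name, value) tuple.
import Mathlib
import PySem

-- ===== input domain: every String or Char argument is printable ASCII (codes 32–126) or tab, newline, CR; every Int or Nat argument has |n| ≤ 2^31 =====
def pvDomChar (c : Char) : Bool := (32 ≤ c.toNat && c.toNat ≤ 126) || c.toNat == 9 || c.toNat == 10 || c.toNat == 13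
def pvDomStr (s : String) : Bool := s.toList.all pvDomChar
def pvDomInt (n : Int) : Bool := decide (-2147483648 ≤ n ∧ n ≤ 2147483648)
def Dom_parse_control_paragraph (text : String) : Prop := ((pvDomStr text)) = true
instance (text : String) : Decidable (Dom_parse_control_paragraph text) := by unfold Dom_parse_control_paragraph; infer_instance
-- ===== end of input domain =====

-- B parses in two passes (group the lines, then map each group to a field) instead of A's
-- single stateful loop; objective: alternative decomposition, same asymptotic cost.
-- Equivalence is about the RETURN value on inputs where A returns (Pre_); on A's
-- ValueError inputs both Pythons raise the same error and the ports' values are unclaimed.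

-- `raw_line[0].isspace()` for a line known non-empty in Python; shared literal transcription.
def pvIsCont (l : String) : Bool := (PySem.Str.pyGet? l 0).elim false PySem.Chars.isspace

-- The colon-membership test followed by the one-colon split into (name.strip(), value.lstrip());
-- both Pythons perform exactly these adjacent steps on a header line.
def pvHeaderField? (ln : String) : Option (String × String) :=
  if PySem.Str.isIn ":" ln then
    match PySem.Str.splitMax? ln ":" 1 with
    | some (name :: value :: _) => some (PySem.Str.strip name, PySem.Str.lstrip value)
    | _ => none          -- unreachable: the one-colon split of a line containing a colon gives two pieces
  else none              -- ValueError("Invalid control line"), outside Pre_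

-- ===== PORT A =====
-- A's loop state: fields accumulated, current_name (Option), current_value_lines.
def pvALoop : List String → List (String × String) → Option String → List String → List (String × String)
  | [], fields, cn, cur =>
      match cn with
      | some n => fields ++ [(n, PySem.Str.join "\n" cur)]
      | none => fields
  | ln :: rest, fields, cn, cur =>
      if PySem.Str.strip ln = "" then pvALoop rest fields cn cur
      else if pvIsCont ln then
        match cn with
        | none => fields                          -- ValueError (orphan continuation), outside Pre_
        | some n => pvALoop rest fields (some n) (cur ++ [ln])
      else
        let fields' := match cn with
          | some n => fields ++ [(n, PySem.Str.join "\n" cur)]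
          | none => fields
        match pvHeaderField? ln with
        | some (n, v) => pvALoop rest fields' (some n) [v]
        | none => fields'                         -- ValueError (no colon), outside Pre_

def parse_control_paragraph (text : String) : List (String × String) :=
  pvALoop (PySem.Str.splitlines text) [] none []

-- ===== PORT B =====
-- Pass 1: group lines; `groups` kept reversed with each group reversed (append-to-last = cons).
def pvGroupLoop : List String → List (List String) → List (List String)
  | [], gsRev => (gsRev.map List.reverse).reverse
  | ln :: rest, gsRev =>
      if PySem.Str.strip ln = "" then pvGroupLoop rest gsRev
      else if pvIsCont ln then
        match gsRev with
        | [] => pvGroupLoop rest [[ln]]           -- ValueError (orphan continuation) in Python: placeholder, outside Pre_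
        | g :: tl => pvGroupLoop rest ((ln :: g) :: tl)
      else pvGroupLoop rest ([ln] :: gsRev)

-- Pass 2: each group [head, conts...] becomes one field.
def pvFieldsOf : List (List String) → List (String × String)
  | [] => []
  | (head :: conts) :: rest =>
      match pvHeaderField? head with
      | some (n, v) => (n, PySem.Str.join "\n" (v :: conts)) :: pvFieldsOf rest
      | none => []                                -- ValueError (no colon), outside Pre_
  | [] :: _ => []                                 -- unreachable: every group starts with its header

def parse_control_paragraph_alt (text : String) : List (String × String) :=
  pvFieldsOf (pvGroupLoop (PySem.Str.splitlines text) [])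

-- ===== PRECONDITION & SPEC =====
-- Pre_ excludes exactly the inputs on which Python A raises ValueError: a first non-blank
-- line starting with whitespace (orphan continuation) or a non-continuation line with no colon.
def Pre_parse_control_paragraph (text : String) : Prop :=
  let ls := (PySem.Str.splitlines text).filter (fun l => !(PySem.Str.strip l == ""))
  (∀ l ∈ ls.take 1, pvIsCont l = false) ∧
  (∀ l ∈ ls, pvIsCont l = false → PySem.Str.isIn ":" l = true)
instance (text : String) : Decidable (Pre_parse_control_paragraph text) := by
  unfold Pre_parse_control_paragraph; infer_instance

def pvWitness_parse_control_paragraph : String :=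
  "Source: hwe\nDepends: a,\n b\n\nArch: all"

def Spec_parse_control_paragraph (text : String) (out : List (String × String)) : Prop := out = parse_control_paragraph_alt text
instance (text : String) (out : List (String × String)) : Decidable (Spec_parse_control_paragraph text out) := by unfold Spec_parse_control_paragraph; infer_instance

-- ===== CLAIM (what is proved, stated in full; the proofs are below) =====
def Claim_equal_parse_control_paragraph : Prop := ∀ (text : String), Dom_parse_control_paragraph text → Pre_parse_control_paragraph text → Spec_parse_control_paragraph text (parse_control_paragraph text)

-- ===== LEMMAS AND PROOFS =====

-- Proof-side fusion of B's two passes, shaped like A's loop but with the state as one Option.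
def pvMid : List String → Option (String × List String) → List (String × String)
  | [], none => []
  | [], some (n, cur) => [(n, PySem.Str.join "\n" cur)]
  | ln :: rest, st =>
      if PySem.Str.strip ln = "" then pvMid rest st
      else if pvIsCont ln then
        match st with
        | none => []
        | some (n, cur) => pvMid rest (some (n, cur ++ [ln]))
      else
        let emitted := match st with
          | none => []
          | some (n, cur) => [(n, PySem.Str.join "\n" cur)]
        match pvHeaderField? ln with
        | some (n, v) => emitted ++ pvMid rest (some (n, [v]))
        | none => emitted

-- A's loop equals the fused form, with fields factored out in front.
theorem pvALoop_eq_mid (ls : List String) : ∀ (fields : List (String × String)) (cn : Option String) (cur : List String),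
    pvALoop ls fields cn cur =
      fields ++ pvMid ls (cn.map (fun n => (n, cur))) := by
  induction ls with
  | nil => intro fields cn cur; cases cn <;> simp [pvALoop, pvMid]
  | cons ln rest ih =>
    intro fields cn cur
    by_cases hb : PySem.Str.strip ln = ""
    · simp [pvALoop, pvMid, hb, ih]
    · by_cases hc : pvIsCont ln = true
      · cases cn <;> simp [pvALoop, pvMid, hb, hc, ih]
      · cases hf : pvHeaderField? ln with
        | none => cases cn <;> simp [pvALoop, pvMid, hb, hc, hf]
        | some nv => cases nv with
          | mk n v => cases cn <;> simp [pvALoop, pvMid, hb, hc, hf, ih]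

-- Earlier (closed) groups pass through B's grouping loop untouched.
theorem pvGroupLoop_peel (ls : List String) : ∀ (g : List String) (tl : List (List String)),
    pvGroupLoop ls (g :: tl) = (tl.map List.reverse).reverse ++ pvGroupLoop ls [g] := by
  induction ls with
  | nil => intro g tl; simp [pvGroupLoop]
  | cons ln rest ih =>
    intro g tl
    by_cases hb : PySem.Str.strip ln = ""
    · simp only [pvGroupLoop, if_pos hb]; exact ih g tl
    · by_cases hc : pvIsCont ln = true
      · simp only [pvGroupLoop, if_neg hb, hc, ite_true]; exact ih (ln :: g) tl
      · simp only [pvGroupLoop, if_neg hb, hc, Bool.false_eq_true, ite_false]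
        rw [ih [ln] (g :: tl), ih [ln] [g]]
        simp

-- A group whose header yields no field makes B's second pass stop with [].
theorem pvFieldsOf_bad (ls : List String) : ∀ (conts : List String) (ln : String),
    pvHeaderField? ln = none →
    pvFieldsOf (pvGroupLoop ls [conts.reverse ++ [ln]]) = [] := by
  induction ls with
  | nil => intro conts ln hf; simp [pvGroupLoop, pvFieldsOf, hf]
  | cons l rest ih =>
    intro conts ln hf
    by_cases hb : PySem.Str.strip l = ""
    · simp [pvGroupLoop, hb, ih _ _ hf]
    · by_cases hc : pvIsCont l = true
      · have : l :: (conts.reverse ++ [ln]) = (conts ++ [l]).reverse ++ [ln] := by simp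
        simp only [pvGroupLoop, if_neg hb, hc, ite_true, this]
        exact ih _ _ hf
      · simp only [pvGroupLoop, if_neg hb, hc, Bool.false_eq_true, ite_false]
        rw [pvGroupLoop_peel]
        simp [pvFieldsOf, hf]

-- Main simulation for an open group: B's remaining work equals the fused form.
theorem pvB_main (ls : List String) : ∀ (conts : List String) (ln n v : String),
    pvHeaderField? ln = some (n, v) →
    pvFieldsOf (pvGroupLoop ls [conts.reverse ++ [ln]]) =
      pvMid ls (some (n, v :: conts)) := by
  induction ls with
  | nil => intro conts ln n v hf; simp [pvGroupLoop, pvFieldsOf, pvMid, hf]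
  | cons l rest ih =>
    intro conts ln n v hf
    by_cases hb : PySem.Str.strip l = ""
    · simp [pvGroupLoop, pvMid, hb, ih _ _ _ _ hf]
    · by_cases hc : pvIsCont l = true
      · have hgr : l :: (conts.reverse ++ [ln]) = (conts ++ [l]).reverse ++ [ln] := by simp
        simp only [pvGroupLoop, pvMid, if_neg hb, hc, ite_true, hgr]
        rw [ih _ _ _ _ hf]
        simp
      · simp only [pvGroupLoop, pvMid, if_neg hb, hc, Bool.false_eq_true, ite_false]
        rw [pvGroupLoop_peel]
        cases hf2 : pvHeaderField? l with
        | none =>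
          have := pvFieldsOf_bad rest ([] : List String) l hf2
          simp only [List.reverse_nil, List.nil_append] at this
          simp [pvFieldsOf, hf, this]
        | some nv =>
          cases nv with
          | mk n2 v2 =>
            have := ih ([] : List String) l n2 v2 hf2
            simp only [List.reverse_nil, List.nil_append] at this
            simp [pvFieldsOf, hf, this]

-- Starting from no group, B computes the fused form from the empty state;
-- needs Pre_'s first clause: the first non-blank line is not a continuation line.
theorem pvB_none (ls : List String)
    (h1 : ∀ l ∈ (ls.filter (fun l => !(PySem.Str.strip l == ""))).take 1, pvIsCont l = false) :
    pvFieldsOf (pvGroupLoop ls []) = pvMid ls none := by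
  induction ls with
  | nil => simp [pvGroupLoop, pvFieldsOf, pvMid]
  | cons l rest ih =>
    by_cases hb : PySem.Str.strip l = ""
    · have hb' : (!(PySem.Str.strip l == "")) = false := by simp [hb]
      simp only [List.filter_cons, hb'] at h1
      simp [pvGroupLoop, pvMid, hb, ih h1]
    · have hl : pvIsCont l = false := by
        apply h1 l
        simp [hb]
      by_cases hc : pvIsCont l = true
      · rw [hl] at hc; exact absurd hc (by simp)
      · simp only [pvGroupLoop, pvMid, if_neg hb, hc, Bool.false_eq_true, ite_false]
        cases hf : pvHeaderField? l with
        | none =>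
          have := pvFieldsOf_bad rest ([] : List String) l hf
          simp only [List.reverse_nil, List.nil_append] at this
          simp [this]
        | some nv =>
          cases nv with
          | mk n v =>
            have := pvB_main rest ([] : List String) l n v hf
            simp only [List.reverse_nil, List.nil_append] at this
            simp [this]

-- ===== VERDICT (by name: the statement is the Claim_ definition above) =====
theorem parse_control_paragraph_spec : Claim_equal_parse_control_paragraph := by
  intro text _ hpre
  unfold Pre_parse_control_paragraph at hpre
  unfold Spec_parse_control_paragraph parse_control_paragraph parse_control_paragraph_alt
  rw [pvALoop_eq_mid, pvB_none _ hpre.1]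
  simp
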